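-- pv_equiv track=rewrite | github.com/sowmyadeva3/DSA | BinarySearch_KillingSpree.py | killinSpree
-- ===== SOURCE A (Python) =====
-- import math
--
-- def killinSpree (n):
--     low=1
--     high=int(math.sqrt(n))
--     while low<=high:
--         mid=(low+high)//2
--         sum= (mid*(mid+1)*((2*mid)+1))//6
--         if sum>n:
--             high=mid-1
--         else:
--             low=mid+1
--     return high
-- ===== SOURCE B (Python) =====
-- def killinSpree(n):
--     # largest k with 1^2 + ... + k^2 <= n, by a running-sum forward scan
--     total = 0
--     k = 0
--     while total + (k + 1) * (k + 1) <= n: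
--         k += 1
--         total += k * k
--     return k
-- ===== Notes on version B (the rewrite author's own statement) =====
-- stated objective: simpler
-- what changed: Replaces the binary search over the closed-form partial-sum formula (and the float math.sqrt bound) with a direct integer forward scan that maintains the running sum of squares.
import Mathlib
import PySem

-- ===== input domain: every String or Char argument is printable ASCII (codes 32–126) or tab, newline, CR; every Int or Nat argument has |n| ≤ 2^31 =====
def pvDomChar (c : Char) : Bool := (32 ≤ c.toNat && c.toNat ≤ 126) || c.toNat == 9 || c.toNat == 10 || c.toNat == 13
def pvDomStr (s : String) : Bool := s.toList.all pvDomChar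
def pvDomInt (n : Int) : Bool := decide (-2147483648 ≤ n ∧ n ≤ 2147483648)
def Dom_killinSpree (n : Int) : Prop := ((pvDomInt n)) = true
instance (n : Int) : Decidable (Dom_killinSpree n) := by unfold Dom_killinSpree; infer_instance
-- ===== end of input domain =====

-- B replaces A's binary search over the closed-form sum-of-squares formula by a simple
-- running-sum forward scan (simpler); on negative n A raises ValueError (excluded by Pre_)
-- while B returns 0.


-- ===== PORT A =====
-- A's `while low <= high` loop, state (low, high); fuel is an upper bound on the number of
-- iterations ((high+1-low).toNat shrinks every iteration), so with enough fuel the fuel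
-- case is never reached and this is exactly A's loop
def killinSpreeLoop : Nat → Int → Int → Int → Int
  | 0, _, _, high => high
  | fuel + 1, n, low, high =>
    if low ≤ high then
      let mid := PySem.Int.floordiv (low + high) 2
      let s := PySem.Int.floordiv (mid * (mid + 1) * (2 * mid + 1)) 6
      if s > n then killinSpreeLoop fuel n low (mid - 1)
      else killinSpreeLoop fuel n (mid + 1) high
    else high

-- int(math.sqrt(n)) is exact as Nat.sqrt on the admitted domain 0 ≤ n ≤ 2^31 (the double
-- sqrt is correctly rounded and cannot cross an integer there); n < 0 raises (outside Pre_)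
def killinSpree (n : Int) : Int :=
  killinSpreeLoop (Nat.sqrt n.toNat) n 1 ((Nat.sqrt n.toNat : Nat) : Int)

-- ===== PORT B =====
-- B's while loop, state (total, k); fuel bounds the iteration count ((n-total-k).toNat
-- shrinks every iteration while k stays ≥ 0), so with enough fuel this is exactly B's loop
def killinSpreeAltLoop : Nat → Int → Int → Int → Int
  | 0, _, _, k => k
  | fuel + 1, n, total, k =>
    if total + (k + 1) * (k + 1) ≤ n then
      killinSpreeAltLoop fuel n (total + (k + 1) * (k + 1)) (k + 1)
    else k

def killinSpree_alt (n : Int) : Int :=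
  killinSpreeAltLoop n.toNat n 0 0

-- ===== PRECONDITION & SPEC =====
-- Pre_ excludes exactly the negative n, on which A raises ValueError in math.sqrt
def Pre_killinSpree (n : Int) : Prop := 0 ≤ n
instance (n : Int) : Decidable (Pre_killinSpree n) := by unfold Pre_killinSpree; infer_instance
def pvWitness_killinSpree : Int := 30

def Spec_killinSpree (n : Int) (out : Int) : Prop := out = killinSpree_alt n
instance (n : Int) (out : Int) : Decidable (Spec_killinSpree n out) := by unfold Spec_killinSpree; infer_instance

-- ===== CLAIM (what is proved, stated in full; the proofs are below) =====
def Claim_equal_killinSpree : Prop := ∀ (n : Int), Dom_killinSpree n → Pre_killinSpree n → Spec_killinSpree n (killinSpree n)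

-- ===== LEMMAS AND PROOFS =====
-- S k = (k(k+1)(2k+1)) // 6, the value A's loop body computes as `sum`;
-- both loop results are characterised as the unique r ≥ 0 with S r ≤ n < S (r+1)
def S (k : Int) : Int := PySem.Int.floordiv (k * (k + 1) * (2 * k + 1)) 6

lemma six_dvd (k : Int) : (6:Int) ∣ k * (k + 1) * (2 * k + 1) := by
  obtain ⟨q, r, hr0, hr6, rfl⟩ : ∃ q r : Int, 0 ≤ r ∧ r < 6 ∧ k = 6 * q + r :=
    ⟨k / 6, k % 6, by omega, by omega, by omega⟩
  interval_cases r
  · exact ⟨q * (6 * q + 1) * (12 * q + 1), by ring⟩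
  · exact ⟨(6 * q + 1) * (3 * q + 1) * (4 * q + 1), by ring⟩
  · exact ⟨(3 * q + 1) * (2 * q + 1) * (12 * q + 5), by ring⟩
  · exact ⟨(2 * q + 1) * (3 * q + 2) * (12 * q + 7), by ring⟩
  · exact ⟨(3 * q + 2) * (6 * q + 5) * (4 * q + 3), by ring⟩
  · exact ⟨(6 * q + 5) * (q + 1) * (12 * q + 11), by ring⟩

lemma six_S (k : Int) : 6 * S k = k * (k + 1) * (2 * k + 1) := by
  obtain ⟨c, hc⟩ := six_dvd k
  unfold S
  rw [PySem.Int.floordiv_eq_ediv_of_pos (by norm_num), hc]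
  rw [Int.mul_ediv_cancel_left c (by norm_num)]

lemma S_succ (k : Int) : S (k + 1) = S k + (k + 1) * (k + 1) := by
  have h1 := six_S k
  have h2 := six_S (k + 1)
  have h3 : (k + 1) * (k + 1 + 1) * (2 * (k + 1) + 1)
      = k * (k + 1) * (2 * k + 1) + 6 * ((k + 1) * (k + 1)) := by ring
  linarith

lemma S_mono {a b : Int} (ha : 0 ≤ a) (hab : a ≤ b) : S a ≤ S b := by
  have h1 := six_S a
  have h2 := six_S b
  have key : b * (b + 1) * (2 * b + 1) - a * (a + 1) * (2 * a + 1)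
      = (b - a) * (2 * (b * b + a * b + a * a) + 3 * (b + a) + 1) := by ring
  have hb : 0 ≤ b := ha.trans hab
  have hpos : 0 ≤ 2 * (b * b + a * b + a * a) + 3 * (b + a) + 1 := by positivity
  nlinarith [mul_nonneg (sub_nonneg.2 hab) hpos]

lemma S_ge_sq {m : Int} (hm : 1 ≤ m) : m * m ≤ S m := by
  have h1 := six_S m
  have key : m * (m + 1) * (2 * m + 1) - 6 * (m * m) = m * ((2 * m - 1) * (m - 1)) := by ring
  have h2 : 0 ≤ m * ((2 * m - 1) * (m - 1)) :=
    mul_nonneg (by omega) (mul_nonneg (by omega) (by omega))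
  linarith

lemma S_zero : S 0 = 0 := by decide

lemma S_unique {n a b : Int} (ha : 0 ≤ a) (hb : 0 ≤ b)
    (h1 : S a ≤ n) (h2 : n < S (a + 1)) (h3 : S b ≤ n) (h4 : n < S (b + 1)) : a = b := by
  rcases lt_trichotomy a b with h | h | h
  · exact absurd ((S_mono (by omega) (by omega : a + 1 ≤ b)).trans h3) (by omega)
  · exact h
  · exact absurd ((S_mono (by omega) (by omega : b + 1 ≤ a)).trans h1) (by omega)

lemma loopA_spec (n : Int) : ∀ (fuel : Nat) (low high : Int),
    (high + 1 - low).toNat ≤ fuel → 1 ≤ low → S (low - 1) ≤ n → n < S (high + 1) →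
    low ≤ high + 1 →
    0 ≤ killinSpreeLoop fuel n low high ∧ S (killinSpreeLoop fuel n low high) ≤ n ∧
      n < S (killinSpreeLoop fuel n low high + 1) := by
  intro fuel
  induction fuel with
  | zero =>
    intro low high hf h1 h2 h3 h4
    have hred : killinSpreeLoop 0 n low high = high := rfl
    rw [hred]
    refine ⟨by omega, ?_, h3⟩
    rw [show high = low - 1 from by omega]
    exact h2
  | succ fuel ih =>
    intro low high hf h1 h2 h3 h4
    simp only [killinSpreeLoop]
    split_ifs with h hc
    · -- low ≤ high, sum > n : high := mid - 1
      have hmid : low ≤ PySem.Int.floordiv (low + high) 2 ∧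
          PySem.Int.floordiv (low + high) 2 ≤ high := PySem.Int.floordiv_two_mid_bounds h
      have hsn : n < S (PySem.Int.floordiv (low + high) 2) := hc
      refine ih low (PySem.Int.floordiv (low + high) 2 - 1) (by omega) h1 h2 ?_ (by omega)
      rw [show PySem.Int.floordiv (low + high) 2 - 1 + 1 = PySem.Int.floordiv (low + high) 2
        from by ring]
      exact hsn
    · -- low ≤ high, sum ≤ n : low := mid + 1
      have hmid : low ≤ PySem.Int.floordiv (low + high) 2 ∧
          PySem.Int.floordiv (low + high) 2 ≤ high := PySem.Int.floordiv_two_mid_bounds h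
      have hsn : S (PySem.Int.floordiv (low + high) 2) ≤ n := not_lt.mp hc
      refine ih (PySem.Int.floordiv (low + high) 2 + 1) high (by omega) (by omega) ?_ h3
        (by omega)
      rw [show PySem.Int.floordiv (low + high) 2 + 1 - 1 = PySem.Int.floordiv (low + high) 2
        from by ring]
      exact hsn
    · -- exit: low > high, return high = low - 1
      refine ⟨by omega, ?_, h3⟩
      rw [show high = low - 1 from by omega]
      exact h2

lemma loopB_spec (n : Int) : ∀ (fuel : Nat) (total k : Int),
    (n - total - k).toNat ≤ fuel → 0 ≤ k → total = S k → total ≤ n →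
    0 ≤ killinSpreeAltLoop fuel n total k ∧ S (killinSpreeAltLoop fuel n total k) ≤ n ∧
      n < S (killinSpreeAltLoop fuel n total k + 1) := by
  intro fuel
  induction fuel with
  | zero =>
    intro total k hf hk ht htn
    have hred : killinSpreeAltLoop 0 n total k = k := rfl
    rw [hred]
    have hksq : k < (k + 1) * (k + 1) := by nlinarith [mul_self_nonneg k]
    refine ⟨hk, ht ▸ htn, ?_⟩
    rw [S_succ, ← ht]
    generalize (k + 1) * (k + 1) = q at hksq ⊢
    omega
  | succ fuel ih =>
    intro total k hf hk ht htn
    simp only [killinSpreeAltLoop]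
    split_ifs with h
    · have hq : (0:Int) ≤ k * k + k := by nlinarith [mul_self_nonneg (2 * k + 1)]
      have he : (k + 1) * (k + 1) = k * k + 2 * k + 1 := by ring
      refine ih (total + (k + 1) * (k + 1)) (k + 1) ?_ (by omega) (by rw [S_succ, ht]) h
      rw [he] at h ⊢
      generalize k * k = a at h hq ⊢
      omega
    · refine ⟨hk, ht ▸ htn, ?_⟩
      rw [S_succ, ← ht]
      exact not_le.mp h

-- ===== VERDICT (by name: the statement is the Claim_ definition above) =====
theorem killinSpree_spec : Claim_equal_killinSpree := by
  intro n _ hn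
  unfold Spec_killinSpree killinSpree killinSpree_alt
  set h : Int := ((Nat.sqrt n.toNat : Nat) : Int) with hh
  have hh0 : 0 ≤ h := by positivity
  have hsq : n < (h + 1) * (h + 1) := by
    have h1 : n.toNat < (n.toNat.sqrt.succ) * n.toNat.sqrt.succ := Nat.lt_succ_sqrt n.toNat
    simp only [Nat.succ_eq_add_one] at h1
    have hn' : (n.toNat : Int) = n := Int.toNat_of_nonneg hn
    have h2 : (n.toNat : Int) < (((n.toNat.sqrt + 1) * (n.toNat.sqrt + 1) : Nat) : Int) := by
      exact_mod_cast h1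
    rw [hn'] at h2
    rw [hh]
    push_cast at h2 ⊢
    exact h2
  have hS : n < S (h + 1) := lt_of_lt_of_le hsq (S_ge_sq (by omega))
  have HA := loopA_spec n (Nat.sqrt n.toNat) 1 h (by omega) (by norm_num)
    (by simpa [S_zero] using hn) hS (by omega)
  have HB := loopB_spec n n.toNat 0 0 (by omega) le_rfl (by rw [S_zero]) hn
  exact S_unique HA.1 HB.1 HA.2.1 HA.2.2 HB.2.1 HB.2.2
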